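-- pv_equiv track=rewrite | github.com/lzkmylz/missionPlanAlgo | scripts/config.py | expand_algorithm_selection
-- ===== SOURCE A (Python) =====
-- from typing import Dict, Any, List
--
-- ALGORITHM_SELECTION_SHORTCUTS = {
--     'all': ['greedy', 'edd', 'ga', 'sa', 'aco', 'pso', 'tabu'],
--     'basic': ['greedy', 'edd', 'ga'],
--     'meta': ['ga', 'sa', 'aco', 'pso', 'tabu'],
--     'greedy': ['greedy', 'edd', 'spt'],
-- }
--
-- def expand_algorithm_selection(selections: List[str]) -> List[str]:
--     """
--     扩展算法选择快捷方式
--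
--     Args:
--         selections: 选择列表，可包含快捷方式如 'all', 'basic', 'meta'
--
--     Returns:
--         展开的算法键名列表，去重并保持顺序
--
--     Example:
--         >>> expand_algorithm_selection(['basic', 'sa'])
--         ['greedy', 'edd', 'ga', 'sa']
--     """
--     result = []
--     for s in selections:
--         s_lower = s.lower()
--         if s_lower in ALGORITHM_SELECTION_SHORTCUTS:
--             result.extend(ALGORITHM_SELECTION_SHORTCUTS[s_lower])
--         else:
--             result.append(s_lower)
--
--     # 去重并保持顺序
--     return list(dict.fromkeys(result))
-- ===== SOURCE B (Python) =====
-- ALGORITHM_SELECTION_SHORTCUTS = {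
--     'all': ['greedy', 'edd', 'ga', 'sa', 'aco', 'pso', 'tabu'],
--     'basic': ['greedy', 'edd', 'ga'],
--     'meta': ['ga', 'sa', 'aco', 'pso', 'tabu'],
--     'greedy': ['greedy', 'edd', 'spt'],
-- }
--
-- def expand_algorithm_selection(selections):
--     # Back-to-front: walk the selections right-to-left keeping the result in
--     # REVERSED order; each step prepends (logically) the current expansion and
--     # drops the later occurrences it supersedes, so the earliest occurrence of
--     # every key ends up first without any global dedup pass.  Correct because
--     # each table expansion is itself duplicate-free.
--     rout = []     # result so far, reversed
--     seen = set()  # exactly the keys currently in rout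
--     for s in reversed(selections):
--         s_lower = s.lower()
--         head = ALGORITHM_SELECTION_SHORTCUTS.get(s_lower, [s_lower])
--         if not seen.isdisjoint(head):
--             # this expansion supersedes some later occurrences: drop them
--             rout = [k for k in rout if k not in head]
--         rout.extend(reversed(head))
--         seen.update(head)
--     rout.reverse()
--     return rout
-- ===== Notes on version B (the rewrite author's own statement) =====
-- stated objective: alternative
-- what changed: B walks the selections right-to-left keeping the result reversed: each expansion is logically prepended and the later occurrences it supersedes are dropped (guarded by a disjointness test), so no intermediate concatenated list and no final dict.fromkeys dedup pass exist; correct because the table's expansion lists are duplicate-free.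
import Mathlib
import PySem

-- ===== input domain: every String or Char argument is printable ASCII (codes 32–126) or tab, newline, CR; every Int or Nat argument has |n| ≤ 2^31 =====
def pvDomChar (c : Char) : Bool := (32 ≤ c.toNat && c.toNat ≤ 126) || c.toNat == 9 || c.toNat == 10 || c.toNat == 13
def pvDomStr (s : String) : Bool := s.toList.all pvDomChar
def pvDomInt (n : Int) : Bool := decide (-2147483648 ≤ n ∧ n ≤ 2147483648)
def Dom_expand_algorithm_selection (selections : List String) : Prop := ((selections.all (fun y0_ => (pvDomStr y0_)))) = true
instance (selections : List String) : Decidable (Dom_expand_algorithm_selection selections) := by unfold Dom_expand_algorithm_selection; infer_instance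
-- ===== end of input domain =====

-- B builds the result back-to-front: a right-to-left pass keeps the result reversed, each
-- expansion is logically prepended and the later occurrences it supersedes are dropped, so
-- there is no concatenated intermediate list and no dict.fromkeys dedup pass (objective:
-- alternative).

-- ===== PORT A =====
def ALGORITHM_SELECTION_SHORTCUTS : PySem.Dict String (List String) :=
  PySem.Dict.ofList
    [("all", ["greedy", "edd", "ga", "sa", "aco", "pso", "tabu"]),
     ("basic", ["greedy", "edd", "ga"]),
     ("meta", ["ga", "sa", "aco", "pso", "tabu"]),
     ("greedy", ["greedy", "edd", "spt"])]

def expand_algorithm_selection (selections : List String) : List String :=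
  let result := selections.foldl (fun result s =>
    let s_lower := PySem.Str.lower s
    if ALGORITHM_SELECTION_SHORTCUTS.contains s_lower then
      result ++ ALGORITHM_SELECTION_SHORTCUTS.getD s_lower []
    else
      result ++ [s_lower]) []
  PySem.List.dedup result

-- ===== PORT B =====
-- ALGORITHM_SELECTION_SHORTCUTS.get(s_lower, [s_lower])
def pvExpansionOf (s : String) : List String :=
  let s_lower := PySem.Str.lower s
  PySem.Dict.getD ALGORITHM_SELECTION_SHORTCUTS s_lower [s_lower]

-- one step of the right-to-left pass: state = (result-so-far reversed, its key set)
def pvStepRev (st : List String × PySem.Set String) (s : String) : List String × PySem.Set String :=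
  let head := pvExpansionOf s
  let rout := if !(PySem.Set.isdisjoint st.2 head) then
      st.1.filter (fun k => !(head.contains k))
    else
      st.1
  (rout ++ head.reverse, PySem.Set.update st.2 head)

def expand_algorithm_selection_alt (selections : List String) : List String :=
  (selections.reverse.foldl pvStepRev (([] : List String), (PySem.Set.empty : PySem.Set String))).1.reverse

-- ===== PRECONDITION & SPEC =====
def Spec_expand_algorithm_selection (selections : List String) (out : List String) : Prop := out = expand_algorithm_selection_alt selections
instance (selections : List String) (out : List String) : Decidable (Spec_expand_algorithm_selection selections out) := by unfold Spec_expand_algorithm_selection; infer_instance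

-- ===== CLAIM (what is proved, stated in full; the proofs are below) =====
def Claim_equal_expand_algorithm_selection : Prop := ∀ (selections : List String), Dom_expand_algorithm_selection selections → Spec_expand_algorithm_selection selections (expand_algorithm_selection selections)

-- ===== LEMMAS AND PROOFS =====

-- A's loop body appends exactly B's expansion of s
theorem pv_ext_eq_append (acc : List String) (s : String) :
    (let s_lower := PySem.Str.lower s
     if ALGORITHM_SELECTION_SHORTCUTS.contains s_lower then
       acc ++ ALGORITHM_SELECTION_SHORTCUTS.getD s_lower []
     else
       acc ++ [s_lower]) = acc ++ pvExpansionOf s := by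
  simp only [pvExpansionOf, PySem.Dict.getD_eq_get?_getD,
    PySem.Dict.contains_eq_isSome_get?]
  cases h : PySem.Dict.get? ALGORITHM_SELECTION_SHORTCUTS (PySem.Str.lower s) <;> simp

-- every expansion produced by B (a table row, or the singleton) is duplicate-free
theorem pv_nodup_expansion (s : String) : (pvExpansionOf s).Nodup := by
  unfold pvExpansionOf
  rw [PySem.Dict.getD_eq_get?_getD]
  have hd : ALGORITHM_SELECTION_SHORTCUTS =
      PySem.Dict.mk
        [("all", ["greedy", "edd", "ga", "sa", "aco", "pso", "tabu"]),
         ("basic", ["greedy", "edd", "ga"]),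
         ("meta", ["ga", "sa", "aco", "pso", "tabu"]),
         ("greedy", ["greedy", "edd", "spt"])] := by decide
  rw [hd]
  simp only [PySem.Dict.get?_mk_cons]
  split_ifs <;> first | decide | simp [PySem.Dict.get?]

-- ordered dedup splits at an append whose left part is duplicate-free
theorem pv_ofList_append_nodup (e : List String) :
    ∀ (ys : List String), e.Nodup →
      PySem.Set.ofList (e ++ ys)
        = e ++ (PySem.Set.ofList ys).filter (fun k => !(e.contains k)) := by
  induction e with
  | nil => intro ys _; simp
  | cons x e ih =>
    intro ys h
    rcases List.nodup_cons.mp h with ⟨hx, he⟩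
    rw [List.cons_append, PySem.Set.ofList_cons, ih ys he]
    simp only [PySem.Set.discard, List.filter_append]
    have h1 : e.filter (fun y => !(y == x)) = e :=
      List.filter_eq_self.mpr (fun a ha => by
        have hne : a ≠ x := fun hax => hx (hax ▸ ha)
        simp [hne])
    have h2 : ((PySem.Set.ofList ys).filter (fun k => !(e.contains k))).filter
        (fun y => !(y == x))
        = (PySem.Set.ofList ys).filter (fun k => !((x :: e).contains k)) := by
      rw [List.filter_filter]
      apply List.filter_congr
      intro a _
      simp only [List.contains_cons]
      cases hax : (a == x) <;> cases hae : e.contains a <;> simp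
    rw [h1, h2]
    rfl

-- A's extend/append loop concatenates exactly the expansions
theorem pv_concat (sel : List String) : ∀ (acc : List String),
    sel.foldl (fun result s =>
      let s_lower := PySem.Str.lower s
      if ALGORITHM_SELECTION_SHORTCUTS.contains s_lower then
        result ++ ALGORITHM_SELECTION_SHORTCUTS.getD s_lower []
      else
        result ++ [s_lower]) acc = acc ++ sel.flatMap pvExpansionOf := by
  induction sel with
  | nil => intro acc; simp
  | cons s rest ih =>
    intro acc
    simp only [List.foldl_cons, List.flatMap_cons]
    rw [pv_ext_eq_append acc s, ih (acc ++ pvExpansionOf s), List.append_assoc]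

-- invariant of the right-to-left pass: the reversed accumulator is the ordered dedup of
-- the expansions' concatenation, and the seen-set holds exactly its keys
theorem pv_inv (sel : List String) :
    (sel.reverse.foldl pvStepRev (([] : List String), (PySem.Set.empty : PySem.Set String))).1.reverse
      = PySem.Set.ofList (sel.flatMap pvExpansionOf)
    ∧ ∀ k, k ∈ (sel.reverse.foldl pvStepRev (([] : List String), (PySem.Set.empty : PySem.Set String))).2
        ↔ k ∈ (sel.reverse.foldl pvStepRev (([] : List String), (PySem.Set.empty : PySem.Set String))).1 := by
  rw [List.foldl_reverse]
  induction sel with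
  | nil =>
    constructor
    · rfl
    · intro k; simp [PySem.Set.empty]
  | cons s rest ih =>
    rw [List.foldr_cons]
    rcases ih with ⟨h1, h2⟩
    set st := rest.foldr (fun x y => pvStepRev y x)
        (([] : List String), (PySem.Set.empty : PySem.Set String)) with hst
    have hnd := pv_nodup_expansion s
    -- in both branches the kept part of the accumulator is the filtered accumulator
    have hX : (if !(PySem.Set.isdisjoint st.2 (pvExpansionOf s)) then
          st.1.filter (fun k => !((pvExpansionOf s).contains k))
        else st.1)
        = st.1.filter (fun k => !((pvExpansionOf s).contains k)) := by
      cases hdis : PySem.Set.isdisjoint st.2 (pvExpansionOf s) with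
      | false => simp
      | true =>
        have hdis' : ∀ x ∈ st.2, x ∉ pvExpansionOf s := by
          simpa [PySem.Set.isdisjoint] using hdis
        simp only [Bool.not_true, Bool.false_eq_true, if_false]
        refine (List.filter_eq_self.mpr ?_).symm
        intro a ha
        have : a ∉ pvExpansionOf s := hdis' a ((h2 a).mpr ha)
        simpa using this
    constructor
    · show (pvStepRev st s).1.reverse = _
      simp only [pvStepRev, hX, List.reverse_append, List.reverse_reverse,
        List.flatMap_cons]
      rw [← List.filter_reverse, h1, pv_ofList_append_nodup _ _ hnd]
    · intro k
      show k ∈ (pvStepRev st s).2 ↔ k ∈ (pvStepRev st s).1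
      simp only [pvStepRev, hX]
      rw [PySem.Set.mem_update]
      by_cases hk : k ∈ pvExpansionOf s
      · simp [hk]
      · have hc : (pvExpansionOf s).contains k = false := by
          simpa using hk
        constructor
        · rintro (h | h)
          · exact List.mem_append_left _ (List.mem_filter.mpr ⟨(h2 k).mp h, by simp [hk]⟩)
          · exact absurd h hk
        · intro h
          rcases List.mem_append.mp h with h | h
          · exact Or.inl ((h2 k).mpr (List.mem_filter.mp h).1)
          · exact absurd (List.mem_reverse.mp h) hk

-- ===== VERDICT (by name: the statement is the Claim_ definition above) =====
theorem expand_algorithm_selection_spec : Claim_equal_expand_algorithm_selection := by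
  intro selections _
  unfold Spec_expand_algorithm_selection expand_algorithm_selection
  rw [PySem.List.dedup_eq_ofList]
  have hfold := pv_concat selections ([] : List String)
  rw [List.nil_append] at hfold
  rw [hfold]
  unfold expand_algorithm_selection_alt
  exact (pv_inv selections).1.symm
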